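-- pv_equiv track=rewrite | github.com/younjunseon/baekjoon-programmers | 프로그래머스/0/181926. 수 조작하기 1/수 조작하기 1.py | solution
-- ===== SOURCE A (Python) =====
-- def solution(n, control):
--     answer = 0
--
--     for i in range(len(control)):
--         if(control[i] == "w"):
--             n = n + 1
--         elif(control[i] == "s"):
--             n = n - 1
--         elif(control[i] == "d"):
--             n = n + 10
--         elif(control[i] == "a"):
--             n = n - 10
--     answer = n
--
--     return answer
-- ===== SOURCE B (Python) =====
-- def solution(n, control):
--     return (n + control.count("w") - control.count("s")
--             + 10 * control.count("d") - 10 * control.count("a"))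
-- ===== Notes on version B (the rewrite author's own statement) =====
-- stated objective: simpler
-- what changed: Replaces the per-character branching loop with four substring counts combined in one closed-form arithmetic expression.
import Mathlib
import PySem

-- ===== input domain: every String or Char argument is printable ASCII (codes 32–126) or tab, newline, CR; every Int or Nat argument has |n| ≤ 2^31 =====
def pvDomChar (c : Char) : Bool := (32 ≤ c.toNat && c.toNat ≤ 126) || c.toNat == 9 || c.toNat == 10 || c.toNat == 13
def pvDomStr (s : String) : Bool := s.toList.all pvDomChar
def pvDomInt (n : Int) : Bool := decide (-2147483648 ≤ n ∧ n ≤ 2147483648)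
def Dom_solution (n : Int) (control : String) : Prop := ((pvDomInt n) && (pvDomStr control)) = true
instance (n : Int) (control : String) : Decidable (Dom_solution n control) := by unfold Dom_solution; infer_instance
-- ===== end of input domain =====

-- B replaces A's per-character branching loop by four counts combined in one closed-form expression (objective: simpler).

-- ===== PORT A =====
-- A iterates over each character of `control` in order, adjusting n per branch.
def solution (n : Int) (control : String) : Int :=
  let n := control.toList.foldl (fun n c =>
    if c == 'w' then n + 1
    else if c == 's' then n - 1
    else if c == 'd' then n + 10
    else if c == 'a' then n - 10
    else n) n
  n

-- ===== PORT B =====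
-- control.count("x") → PySem.Str.count control "x" (exact port of str.count)
def solution_alt (n : Int) (control : String) : Int :=
  n + (PySem.Str.count control "w" : Int) - (PySem.Str.count control "s" : Int)
    + 10 * (PySem.Str.count control "d" : Int) - 10 * (PySem.Str.count control "a" : Int)

-- ===== PRECONDITION & SPEC =====
def Spec_solution (n : Int) (control : String) (out : Int) : Prop := out = solution_alt n control
instance (n : Int) (control : String) (out : Int) : Decidable (Spec_solution n control out) := by unfold Spec_solution; infer_instance

-- ===== CLAIM (what is proved, stated in full; the proofs are below) =====
def Claim_equal_solution : Prop := ∀ (n : Int) (control : String), Dom_solution n control → Spec_solution n control (solution n control)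

-- ===== LEMMAS AND PROOFS =====
theorem go_single (c : Char) : ∀ (l : List Char) (fuel acc : Nat), l.length ≤ fuel →
    PySem.Chars.count.go [c] fuel l acc = acc + l.count c := by
  intro l
  induction l with
  | nil =>
    intro fuel acc h
    cases fuel <;> simp [PySem.Chars.count.go]
  | cons h t ih =>
    intro fuel acc hle
    cases fuel with
    | zero => simp at hle
    | succ f =>
      rw [PySem.Chars.count.go]
      by_cases hc : c = h
      · subst hc
        simp [List.isPrefixOf, ih f (acc + 1) (by simpa using hle)]
        omega
      · simp [List.isPrefixOf, hc, Ne.symm hc, ih f acc (by simpa using hle)]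

theorem chars_count_single (l : List Char) (c : Char) :
    PySem.Chars.count l [c] = l.count c := by
  simp [PySem.Chars.count, go_single c l l.length 0 le_rfl]

theorem foldl_steps (l : List Char) : ∀ (n : Int),
    l.foldl (fun n c =>
      if c == 'w' then n + 1
      else if c == 's' then n - 1
      else if c == 'd' then n + 10
      else if c == 'a' then n - 10
      else n) n
    = n + (l.count 'w' : Int) - (l.count 's' : Int)
        + 10 * (l.count 'd' : Int) - 10 * (l.count 'a' : Int) := by
  induction l with
  | nil => intro n; simp
  | cons h t ih =>
    intro n
    simp only [List.foldl_cons, ih, List.count_cons]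
    by_cases hw : h = 'w' <;> by_cases hs : h = 's' <;> by_cases hd : h = 'd' <;>
      by_cases ha : h = 'a' <;>
    · subst_vars <;>
      simp_all <;> ring

-- ===== VERDICT (by name: the statement is the Claim_ definition above) =====
theorem solution_spec : Claim_equal_solution := by
  intro n control _
  show solution n control = solution_alt n control
  simp only [solution, solution_alt, foldl_steps]
  simp [PySem.Str.count, show ("w" : String).toList = ['w'] from rfl,
    show ("s" : String).toList = ['s'] from rfl, show ("d" : String).toList = ['d'] from rfl,
    show ("a" : String).toList = ['a'] from rfl, chars_count_single]
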